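-- pv_equiv track=rewrite | github.com/nfarnan/cs001X_examples | recursion/TH/03_grab_odds.py | grab_odds
-- ===== SOURCE A (Python) =====
-- def grab_odds(a_list):
-- 	if len(a_list) == 0:
-- 		return []
--
-- 	else:
-- 		odds = grab_odds(a_list[1:])
-- 		if a_list[0] % 2 != 0:
-- 			odds.append(a_list[0])
-- 		return odds
-- ===== SOURCE B (Python) =====
-- def grab_odds(a_list):
--     odds = []
--     for x in reversed(a_list):
--         if x % 2 != 0:
--             odds.append(x)
--     return odds
-- ===== Notes on version B (the rewrite author's own statement) =====
-- stated objective: faster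
-- what changed: Replaces A's slicing recursion (which builds a new sublist per call and appends after the recursive return) with a single iterative pass over reversed(a_list) accumulating odds directly.
import Mathlib
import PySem

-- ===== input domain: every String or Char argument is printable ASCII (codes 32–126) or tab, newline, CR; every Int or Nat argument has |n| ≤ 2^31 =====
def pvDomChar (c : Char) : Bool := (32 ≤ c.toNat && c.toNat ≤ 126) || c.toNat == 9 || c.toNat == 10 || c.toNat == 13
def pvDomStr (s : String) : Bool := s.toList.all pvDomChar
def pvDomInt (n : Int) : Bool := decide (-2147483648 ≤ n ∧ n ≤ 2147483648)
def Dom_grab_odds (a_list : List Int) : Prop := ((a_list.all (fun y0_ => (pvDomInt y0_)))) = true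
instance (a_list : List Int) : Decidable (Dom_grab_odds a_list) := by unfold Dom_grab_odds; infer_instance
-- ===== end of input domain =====

-- ===== PORT A =====
-- A: recursion on the list; odds of the tail, then append the head if odd.
def grab_odds (a_list : List Int) : List Int :=
  match a_list with
  | [] => []
  | x :: rest =>
    let odds := grab_odds rest
    if PySem.Int.mod x 2 ≠ 0 then odds ++ [x] else odds

-- ===== PORT B =====
-- B: one iterative pass over the reversed list, accumulating odds.
def grab_odds_alt (a_list : List Int) : List Int :=
  a_list.reverse.foldl (fun odds x => if PySem.Int.mod x 2 ≠ 0 then odds ++ [x] else odds) []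

-- ===== PRECONDITION & SPEC =====
def Spec_grab_odds (a_list : List Int) (out : List Int) : Prop := out = grab_odds_alt a_list
instance (a_list : List Int) (out : List Int) : Decidable (Spec_grab_odds a_list out) := by unfold Spec_grab_odds; infer_instance

-- ===== CLAIM (what is proved, stated in full; the proofs are below) =====
def Claim_equal_grab_odds : Prop := ∀ (a_list : List Int), Dom_grab_odds a_list → Spec_grab_odds a_list (grab_odds a_list)

-- ===== LEMMAS AND PROOFS =====

-- ===== VERDICT (by name: the statement is the Claim_ definition above) =====
theorem grab_odds_eq_alt (a_list : List Int) : grab_odds a_list = grab_odds_alt a_list := by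
  induction a_list with
  | nil => rfl
  | cons x rest ih =>
    simp only [grab_odds, grab_odds_alt, List.reverse_cons, List.foldl_append, List.foldl_cons,
      List.foldl_nil] at *
    rw [ih]

theorem grab_odds_spec : Claim_equal_grab_odds := by
  intro a_list _
  unfold Spec_grab_odds
  exact grab_odds_eq_alt a_list
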